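-- pv_equiv track=rewrite | github.com/shoc71/profile-maker | profile_resources/Important/scoring_names/main.py | check_consecutive_vowels
-- ===== SOURCE A (Python) =====
-- VOWELS = "AEIOUaeiou"
--
-- def check_consecutive_vowels(name, max_vowel_streak=4):
--     vowel_count = 0
--     for char in name:
--         if char in VOWELS:
--             vowel_count += 1
--             if vowel_count >= max_vowel_streak:
--                 return True  # 4 or more consecutive vowels found
--         else:
--             vowel_count = 0  # Reset if a consonant is found
--     return False  # No 4+ consecutive vowels found
-- ===== SOURCE B (Python) =====
-- VOWELS = "AEIOUaeiou"
--
-- def check_consecutive_vowels(name, max_vowel_streak=4):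
--     # Run-based scan: locate each maximal run of consecutive vowels by index
--     # and compare its length to the threshold (no per-character counter).
--     i = 0
--     n = len(name)
--     while i < n:
--         if name[i] in VOWELS:
--             j = i
--             while j < n and name[j] in VOWELS:
--                 j += 1
--             if j - i >= max_vowel_streak:
--                 return True
--             i = j
--         else:
--             i += 1
--     return False
-- ===== Notes on version B (the rewrite author's own statement) =====
-- stated objective: alternative
-- what changed: Replaced the per-character running vowel counter with a run-based scan that locates each maximal run of consecutive vowels and compares its length to the threshold.
import Mathlib
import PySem

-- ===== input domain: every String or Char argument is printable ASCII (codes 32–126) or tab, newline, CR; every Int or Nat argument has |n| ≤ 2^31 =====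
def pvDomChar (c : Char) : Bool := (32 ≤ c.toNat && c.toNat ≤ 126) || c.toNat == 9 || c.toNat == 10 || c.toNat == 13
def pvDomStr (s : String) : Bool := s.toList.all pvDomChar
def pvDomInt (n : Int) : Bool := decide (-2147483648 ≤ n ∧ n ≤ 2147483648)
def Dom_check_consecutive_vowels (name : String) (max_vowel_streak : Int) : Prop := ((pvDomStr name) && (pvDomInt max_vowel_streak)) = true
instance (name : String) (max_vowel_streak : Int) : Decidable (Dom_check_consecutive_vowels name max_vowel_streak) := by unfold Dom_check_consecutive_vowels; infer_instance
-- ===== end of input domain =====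

-- B replaces A's per-character running vowel counter with an index-based scan that
-- locates each maximal run of consecutive vowels and tests its length (objective: alternative).

-- ===== PORT A =====
def pvVowels : List Char := "AEIOUaeiou".toList

-- `char in VOWELS` for a single char = list membership of the char (exact here)
def pvIsVowel (c : Char) : Bool := pvVowels.contains c

-- the `for char in name` loop with the running `vowel_count`
def pvALoop (m : Int) : List Char → Int → Bool
  | [], _ => false
  | c :: rest, cnt =>
    if pvIsVowel c then
      if cnt + 1 ≥ m then true
      else pvALoop m rest (cnt + 1)
    else pvALoop m rest 0

def check_consecutive_vowels (name : String) (max_vowel_streak : Int) : Bool :=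
  pvALoop max_vowel_streak name.toList 0

-- ===== PORT B =====
-- Source B's inner `while j < n and name[j] in VOWELS: j += 1`; the guard j < n keeps the
-- index in range, so `getD j ' '` is exactly Python's name[j] here
def pvBInner (s : List Char) (n : Nat) (j : Nat) : Nat :=
  if h : j < n ∧ pvIsVowel (s.getD j ' ') = true then pvBInner s n (j + 1) else j
termination_by n - j
decreasing_by omega

-- termination helpers for the outer loop (the port cites pvBInner_lt in decreasing_by)
theorem pvBInner_ge (s : List Char) (n : Nat) (j : Nat) : j ≤ pvBInner s n j := by
  rw [pvBInner]
  split
  · have := pvBInner_ge s n (j + 1)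
    omega
  · exact Nat.le_refl j
termination_by n - j
decreasing_by omega

theorem pvBInner_lt (s : List Char) (n : Nat) (i : Nat) (h : i < n)
    (hv : pvIsVowel (s.getD i ' ') = true) : i < pvBInner s n i := by
  rw [pvBInner, dif_pos ⟨h, hv⟩]
  have := pvBInner_ge s n (i + 1)
  omega

-- Source B's outer `while i < n` loop
def pvBOuter (s : List Char) (n : Nat) (m : Int) (i : Nat) : Bool :=
  if h : i < n then
    if hv : pvIsVowel (s.getD i ' ') = true then
      let j := pvBInner s n i
      if (j : Int) - (i : Int) ≥ m then true
      else pvBOuter s n m j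
    else pvBOuter s n m (i + 1)
  else false
termination_by n - i
decreasing_by
  · have := pvBInner_lt s n i h hv
    omega
  · omega

def check_consecutive_vowels_alt (name : String) (max_vowel_streak : Int) : Bool :=
  pvBOuter name.toList name.toList.length max_vowel_streak 0

-- ===== PRECONDITION & SPEC =====
def Spec_check_consecutive_vowels (name : String) (max_vowel_streak : Int) (out : Bool) : Prop := out = check_consecutive_vowels_alt name max_vowel_streak
instance (name : String) (max_vowel_streak : Int) (out : Bool) : Decidable (Spec_check_consecutive_vowels name max_vowel_streak out) := by unfold Spec_check_consecutive_vowels; infer_instance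

-- ===== CLAIM (what is proved, stated in full; the proofs are below) =====
def Claim_equal_check_consecutive_vowels : Prop := ∀ (name : String) (max_vowel_streak : Int), Dom_check_consecutive_vowels name max_vowel_streak → Spec_check_consecutive_vowels name max_vowel_streak (check_consecutive_vowels name max_vowel_streak)

-- ===== LEMMAS AND PROOFS =====

-- proof-side view of B's scan: structural recursion on the remaining suffix of the string
def pvBLoop (m : Int) : List Char → Bool
  | [] => false
  | c :: rest =>
    if pvIsVowel c then
      let run := ((c :: rest).takeWhile pvIsVowel).length
      if (run : Int) ≥ m then true
      else pvBLoop m ((c :: rest).drop run)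
    else pvBLoop m rest
termination_by l => l.length
decreasing_by
  · simp [*]
  · simp

-- A's loop across a block of vowels: returns true iff the counter would reach m
-- somewhere inside the block, i.e. iff the block is nonempty and cnt + |vs| >= m.
theorem pvALoop_vowel_block (m : Int) (vs : List Char) (rest : List Char) (cnt : Int)
    (hv : ∀ c ∈ vs, pvIsVowel c = true) :
    pvALoop m (vs ++ rest) cnt =
      if vs ≠ [] ∧ cnt + (vs.length : Int) ≥ m then true
      else pvALoop m rest (cnt + (vs.length : Int)) := by
  induction vs generalizing cnt with
  | nil => simp
  | cons c vs' ih =>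
    have hc : pvIsVowel c = true := hv c (List.mem_cons_self ..)
    have hv' : ∀ d ∈ vs', pvIsVowel d = true := fun d hd => hv d (List.mem_cons_of_mem _ hd)
    simp only [List.cons_append, pvALoop, hc, if_true]
    rw [ih _ hv']
    simp only [List.length_cons, ne_eq, reduceCtorEq, not_false_iff, true_and]
    push_cast
    by_cases h1 : cnt + 1 ≥ m
    · rw [if_pos h1, if_pos (by omega)]
    · rw [if_neg h1]
      by_cases h2 : cnt + ((vs'.length : Int) + 1) ≥ m
      · by_cases h3 : vs' = []
        · subst h3; exfalso; simp at h2; omega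
        · rw [if_pos ⟨h3, by omega⟩, if_pos h2]
      · rw [if_neg (fun h => h2 (by omega)), if_neg h2]
        congr 1
        omega

-- drop the length of the leading run = dropWhile
theorem pvDrop_takeWhile_length (p : Char → Bool) (l : List Char) :
    l.drop (l.takeWhile p).length = l.dropWhile p := by
  induction l with
  | nil => rfl
  | cons x xs ih =>
    rw [List.takeWhile_cons, List.dropWhile_cons]
    by_cases hx : p x
    · simpa [hx] using ih
    · simp [hx]

-- the head of `dropWhile p l` fails p
theorem pvDropWhile_head (p : Char → Bool) (l : List Char) (d : Char) (t : List Char)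
    (h : l.dropWhile p = d :: t) : p d = false := by
  induction l with
  | nil => simp at h
  | cons x xs ih =>
    rw [List.dropWhile_cons] at h
    by_cases hx : p x
    · exact ih (by simpa [hx] using h)
    · simp [hx] at h
      simp [← h.1, hx]

theorem pvMain (m : Int) (l : List Char) : pvALoop m l 0 = pvBLoop m l := by
  match l with
  | [] => simp [pvALoop, pvBLoop]
  | c :: rest =>
    by_cases hc : pvIsVowel c = true
    · -- split `c :: rest` into its leading vowel run and the remainder
      have hsplit := List.takeWhile_append_dropWhile (p := pvIsVowel) (l := c :: rest)
      have hvmem : ∀ d ∈ (c :: rest).takeWhile pvIsVowel, pvIsVowel d = true :=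
        fun d hd => List.mem_takeWhile_imp hd
      have hdrop := pvDrop_takeWhile_length pvIsVowel (c :: rest)
      have hvs_ne : (c :: rest).takeWhile pvIsVowel ≠ [] := by
        simp [hc]
      have hA : pvALoop m (c :: rest) 0 =
          if (c :: rest).takeWhile pvIsVowel ≠ [] ∧
              0 + ((((c :: rest).takeWhile pvIsVowel).length : Nat) : Int) ≥ m then true
          else pvALoop m ((c :: rest).dropWhile pvIsVowel)
            (0 + ((((c :: rest).takeWhile pvIsVowel).length : Nat) : Int)) := by
        conv_lhs => rw [← hsplit]
        exact pvALoop_vowel_block m _ _ 0 hvmem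
      rw [hA]
      simp only [pvBLoop, hc, if_true, hdrop, hvs_ne, ne_eq, not_false_iff, true_and, zero_add]
      by_cases hm : ((((c :: rest).takeWhile pvIsVowel).length : Nat) : Int) ≥ m
      · rw [if_pos hm, if_pos hm]
      · rw [if_neg hm, if_neg hm]
        -- the remainder is empty or starts with a non-vowel, so A's counter resets
        match hcase : (c :: rest).dropWhile pvIsVowel with
        | [] => simp [pvALoop, pvBLoop]
        | d :: t =>
          have hd : pvIsVowel d = false := pvDropWhile_head _ _ d t hcase
          have htlen : t.length < rest.length + 1 := by
            have h1 := List.length_dropWhile_le (p := pvIsVowel) (l := c :: rest)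
            rw [hcase] at h1
            simp at h1
            omega
          simp only [pvALoop, pvBLoop, hd, Bool.false_eq_true, if_false]
          exact pvMain m t
    · simp only [pvALoop, pvBLoop, hc, Bool.false_eq_true, if_false]
      exact pvMain m rest
termination_by l.length
decreasing_by
  · simpa using htlen
  · simp

-- the inner index scan computes i + (length of the leading vowel run of the suffix at i)
theorem pvBInner_eq (s : List Char) (j : Nat) :
    pvBInner s s.length j = j + ((s.drop j).takeWhile pvIsVowel).length := by
  rw [pvBInner]
  by_cases hj : j < s.length
  · have hdropj : s.drop j = s[j] :: s.drop (j + 1) := List.drop_eq_getElem_cons hj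
    have hget : s.getD j ' ' = s[j] := List.getD_eq_getElem s ' ' hj
    by_cases hv : pvIsVowel (s.getD j ' ') = true
    · rw [dif_pos ⟨hj, hv⟩, pvBInner_eq s (j + 1), hdropj, List.takeWhile_cons,
        (show pvIsVowel s[j] = true from hget ▸ hv)]
      simp
      omega
    · rw [dif_neg (fun hh => hv hh.2), hdropj, List.takeWhile_cons]
      have : pvIsVowel s[j] = false := by
        rw [← hget]
        exact Bool.eq_false_iff.mpr hv
      simp [this]
  · rw [dif_neg (fun hh => hj hh.1), List.drop_eq_nil_of_le (by omega)]
    simp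
termination_by s.length - j
decreasing_by omega

-- the outer index loop agrees with the suffix-recursion view
theorem pvBOuter_eq (s : List Char) (m : Int) (i : Nat) :
    pvBOuter s s.length m i = pvBLoop m (s.drop i) := by
  rw [pvBOuter]
  by_cases hi : i < s.length
  · have hdropi : s.drop i = s[i] :: s.drop (i + 1) := List.drop_eq_getElem_cons hi
    have hget : s.getD i ' ' = s[i] := List.getD_eq_getElem s ' ' hi
    by_cases hv : pvIsVowel (s.getD i ' ') = true
    · rw [dif_pos hi, dif_pos hv]
      have hkeq := pvBInner_eq s i
      have hk1 : 1 ≤ ((s.drop i).takeWhile pvIsVowel).length := by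
        rw [hdropi, List.takeWhile_cons, (show pvIsVowel s[i] = true from hget ▸ hv)]
        simp
      -- unfold one step of the suffix recursion at s.drop i
      have hBL : pvBLoop m (s.drop i) =
          if (((s.drop i).takeWhile pvIsVowel).length : Int) ≥ m then true
          else pvBLoop m ((s.drop i).drop ((s.drop i).takeWhile pvIsVowel).length) := by
        conv_lhs => rw [hdropi]
        simp only [pvBLoop, (show pvIsVowel s[i] = true from hget ▸ hv), if_true]
        rw [← hdropi]
      rw [hBL, hkeq]
      by_cases hm : (((s.drop i).takeWhile pvIsVowel).length : Int) ≥ m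
      · rw [if_pos (by push_cast; omega), if_pos hm]
      · rw [if_neg (by push_cast; omega), if_neg hm,
          pvBOuter_eq s m (i + ((s.drop i).takeWhile pvIsVowel).length), List.drop_drop]
    · rw [dif_pos hi, dif_neg hv, pvBOuter_eq s m (i + 1)]
      conv_rhs => rw [hdropi]
      have : pvIsVowel s[i] = false := by
        rw [← hget]; exact Bool.eq_false_iff.mpr hv
      simp only [pvBLoop, this, Bool.false_eq_true, if_false]
  · rw [dif_neg hi, List.drop_eq_nil_of_le (by omega)]
    simp [pvBLoop]
termination_by s.length - i
decreasing_by all_goals omega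

-- ===== VERDICT (by name: the statement is the Claim_ definition above) =====
theorem check_consecutive_vowels_spec : Claim_equal_check_consecutive_vowels := by
  intro name m _
  show check_consecutive_vowels name m = check_consecutive_vowels_alt name m
  unfold check_consecutive_vowels check_consecutive_vowels_alt
  rw [pvBOuter_eq, List.drop_zero]
  exact pvMain m name.toList
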